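-- pv_equiv track=rewrite | github.com/need-singularity/sylvian-singularity | verify_round2_math.py | q_binomial
-- ===== SOURCE A (Python) =====
-- def q_binomial(n, k, q):
--     """Compute Gaussian binomial coefficient [n choose k]_q."""
--     if k < 0 or k > n:
--         return 0
--     if k == 0 or k == n:
--         return 1
--     num = 1
--     den = 1
--     for i in range(k):
--         num *= (q**(n-i) - 1)
--         den *= (q**(i+1) - 1)
--     return num // den
-- ===== SOURCE B (Python) =====
-- def q_binomial(n, k, q):
--     """Compute Gaussian binomial coefficient [n choose k]_q via the
--     division-free q-Pascal recurrence [m,j] = [m-1,j-1] + q**j * [m-1,j]."""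
--     if k < 0 or k > n:
--         return 0
--     if k == 0 or k == n:
--         return 1
--     row = [1] + [0] * k
--     for _ in range(n):
--         row = [1] + [row[j - 1] + q ** j * row[j] for j in range(1, k + 1)]
--     return row[k]
-- ===== Notes on version B (the rewrite author's own statement) =====
-- stated objective: alternative
-- what changed: B replaces the product formula with final floor division by the division-free q-Pascal recurrence [n,k]_q = [n-1,k-1]_q + q^k [n-1,k]_q, iterating a row of partial q-binomials; it uses only additions and multiplications and never divides.
-- crash fix: On inputs with 0<k<n and q==1, or q==-1 with k>=2, A raises ZeroDivisionError (its denominator product is 0); B returns the q-binomial value given by the recurrence (e.g. the ordinary binomial coefficient at q=1). — e.g. on q_binomial(4, 2, 1): A raises ZeroDivisionError, B returns 6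
import Mathlib
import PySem

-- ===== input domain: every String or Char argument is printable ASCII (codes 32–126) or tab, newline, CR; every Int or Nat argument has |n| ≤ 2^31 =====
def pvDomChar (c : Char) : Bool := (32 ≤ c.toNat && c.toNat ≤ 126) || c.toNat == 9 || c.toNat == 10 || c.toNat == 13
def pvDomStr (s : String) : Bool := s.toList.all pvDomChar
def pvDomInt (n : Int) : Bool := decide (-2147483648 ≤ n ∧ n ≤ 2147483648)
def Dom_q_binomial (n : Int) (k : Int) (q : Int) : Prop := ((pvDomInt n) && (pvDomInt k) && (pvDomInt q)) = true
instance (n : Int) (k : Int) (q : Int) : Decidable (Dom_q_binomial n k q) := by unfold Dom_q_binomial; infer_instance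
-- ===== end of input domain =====

-- B replaces A's product formula + final floor division by the division-free
-- q-Pascal row recurrence (alternative algorithm, same results wherever A returns).


-- ===== PORT A =====
-- Literal port of A: product of (q^(n-i)-1) and (q^(i+1)-1) over i in range(k),
-- then Python floor division.  In the reached branch 0 < k < n, so the exponents
-- n - i and i + 1 are positive and `.toNat` is exact there.
def q_binomial (n : Int) (k : Int) (q : Int) : Int :=
  if k < 0 ∨ n < k then 0
  else if k = 0 ∨ k = n then 1
  else
    let nd := (PySem.List.pyRange 0 k 1).foldl
      (fun (s : Int × Int) i =>
        (s.1 * (q ^ (n - i).toNat - 1), s.2 * (q ^ (i + 1).toNat - 1))) (1, 1)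
    PySem.Int.floordiv nd.1 nd.2

-- ===== PORT B =====
-- One q-Pascal step: row := [1] + [row[j-1] + q**j*row[j] for j in range(1, k+1)].
-- Indices j-1, j always lie in range of row (length k+1), so pyGetD with default 0
-- is exact; j ≥ 1 in the comprehension, so `.toNat` on the exponent is exact.
def qbAltStep (q : Int) (k : Int) (row : List Int) : List Int :=
  1 :: (PySem.List.pyRange 1 (k + 1) 1).map
    (fun j => PySem.List.pyGetD row (j - 1) 0 + q ^ j.toNat * PySem.List.pyGetD row j 0)

def q_binomial_alt (n : Int) (k : Int) (q : Int) : Int :=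
  if k < 0 ∨ n < k then 0
  else if k = 0 ∨ k = n then 1
  else
    let row0 : List Int := 1 :: List.replicate k.toNat 0
    let rowN := (PySem.List.pyRange 0 n 1).foldl (fun row _ => qbAltStep q k row) row0
    PySem.List.pyGetD rowN k 0

-- ===== PRECONDITION & SPEC =====
-- Pre_ excludes exactly the inputs on which A raises ZeroDivisionError:
-- 0 < k < n together with q = 1, or q = -1 and k ≥ 2, make A's denominator product 0.
def Pre_q_binomial (n : Int) (k : Int) (q : Int) : Prop :=
  (0 < k ∧ k < n) → (q ≠ 1 ∧ (q = -1 → k = 1))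
instance (n : Int) (k : Int) (q : Int) : Decidable (Pre_q_binomial n k q) := by
  unfold Pre_q_binomial; infer_instance
def pvWitness_q_binomial : Int × Int × Int := (4, 2, 2)

-- On inputs with 0<k<n and q=1, or q=-1 with k≥2, A raises ZeroDivisionError;
-- B returns the q-binomial value of the recurrence (the binomial coefficient at q=1).
def Raises_q_binomial (n : Int) (k : Int) (q : Int) : Prop :=
  (0 < k ∧ k < n) ∧ (q = 1 ∨ (q = -1 ∧ 2 ≤ k))
instance (n : Int) (k : Int) (q : Int) : Decidable (Raises_q_binomial n k q) := by
  unfold Raises_q_binomial; infer_instance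
def pvRaiseWitness_q_binomial : Int × Int × Int := (4, 2, 1)
def pvRaiseWitnessOut_q_binomial : Int := 6

def Spec_q_binomial (n : Int) (k : Int) (q : Int) (out : Int) : Prop := out = q_binomial_alt n k q
instance (n : Int) (k : Int) (q : Int) (out : Int) : Decidable (Spec_q_binomial n k q out) := by unfold Spec_q_binomial; infer_instance

-- ===== CLAIM (what is proved, stated in full; the proofs are below) =====
def Claim_equal_q_binomial : Prop := ∀ (n : Int) (k : Int) (q : Int), Dom_q_binomial n k q → Pre_q_binomial n k q → Spec_q_binomial n k q (q_binomial n k q)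

def Claim_raises_q_binomial : Prop :=
  (∀ (n : Int) (k : Int) (q : Int), Dom_q_binomial n k q → Raises_q_binomial n k q → ¬ Pre_q_binomial n k q) ∧
  (Dom_q_binomial (pvRaiseWitness_q_binomial.1) (pvRaiseWitness_q_binomial.2.1) (pvRaiseWitness_q_binomial.2.2) ∧
   Raises_q_binomial (pvRaiseWitness_q_binomial.1) (pvRaiseWitness_q_binomial.2.1) (pvRaiseWitness_q_binomial.2.2) ∧
   q_binomial_alt (pvRaiseWitness_q_binomial.1) (pvRaiseWitness_q_binomial.2.1) (pvRaiseWitness_q_binomial.2.2) = pvRaiseWitnessOut_q_binomial)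

-- ===== LEMMAS AND PROOFS =====

-- The q-Pascal array: qbG q m j = [m choose j]_q.
def qbG (q : Int) : Nat → Nat → Int
  | _, 0 => 1
  | 0, _+1 => 0
  | m+1, j+1 => qbG q m j + q ^ (j+1) * qbG q m (j+1)

-- A's numerator and denominator products, peeled at the last factor.
def qbNum (q : Int) (n : Nat) : Nat → Int
  | 0 => 1
  | k+1 => qbNum q n k * (q ^ (n - k) - 1)

def qbDen (q : Int) : Nat → Int
  | 0 => 1
  | k+1 => qbDen q k * (q ^ (k+1) - 1)

theorem qbG_zero_of_lt (q : Int) : ∀ m j : Nat, m < j → qbG q m j = 0 := by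
  intro m
  induction m with
  | zero => intro j hj; cases j with
    | zero => omega
    | succ j => simp [qbG]
  | succ m ih =>
    intro j hj
    cases j with
    | zero => omega
    | succ j =>
      have h1 : m < j := by omega
      have h2 : m < j + 1 := by omega
      simp [qbG, ih j h1, ih (j+1) h2]

theorem qbG_self (q : Int) : ∀ m : Nat, qbG q m m = 1 := by
  intro m
  induction m with
  | zero => simp [qbG]
  | succ m ih => simp [qbG, ih, qbG_zero_of_lt q m (m+1) (by omega)]

theorem qbNum_front (q : Int) (n : Nat) : ∀ k : Nat, qbNum q (n+1) (k+1) = (q ^ (n+1) - 1) * qbNum q n k := by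
  intro k
  induction k with
  | zero => simp [qbNum, mul_comm]
  | succ k ih =>
    have hs : n + 1 - (k + 1) = n - k := by omega
    calc qbNum q (n+1) (k+2) = qbNum q (n+1) (k+1) * (q ^ (n + 1 - (k+1)) - 1) := rfl
      _ = (q ^ (n+1) - 1) * qbNum q n k * (q ^ (n - k) - 1) := by rw [ih, hs]
      _ = (q ^ (n+1) - 1) * qbNum q n (k+1) := by rw [qbNum]; ring

theorem qb_main (q : Int) : ∀ n k : Nat, k ≤ n → qbNum q n k = qbG q n k * qbDen q k := by
  intro n
  induction n with
  | zero => intro k hk; interval_cases k; simp [qbNum, qbDen, qbG]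
  | succ n ih =>
    intro k hk
    cases k with
    | zero => simp [qbNum, qbDen, qbG]
    | succ k =>
      have hk' : k ≤ n := by omega
      rw [qbNum_front]
      by_cases hkn : k + 1 ≤ n
      · have ih1 := ih k hk'
        have ih2 := ih (k+1) hkn
        have hnum : qbNum q n (k+1) = qbNum q n k * (q ^ (n - k) - 1) := rfl
        have hpow : q ^ (k+1) * q ^ (n - k) = q ^ (n+1) := by
          rw [← pow_add]; congr 1; omega
        show (q ^ (n+1) - 1) * qbNum q n k = qbG q (n+1) (k+1) * qbDen q (k+1)
        have hG : qbG q (n+1) (k+1) = qbG q n k + q ^ (k+1) * qbG q n (k+1) := rfl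
        have hD : qbDen q (k+1) = qbDen q k * (q ^ (k+1) - 1) := rfl
        rw [hG, hD]
        have e1 : qbG q n k * qbDen q k = qbNum q n k := ih1.symm
        have e2 : qbG q n (k+1) * (qbDen q k * (q ^ (k+1) - 1)) = qbNum q n k * (q ^ (n - k) - 1) := by
          rw [show qbDen q k * (q ^ (k+1) - 1) = qbDen q (k+1) from rfl, ← ih2, hnum]
        linear_combination (-(q ^ (k+1) - 1)) * e1 - q ^ (k+1) * e2 - qbNum q n k * hpow
      · have hkeq : k = n := by omega
        subst hkeq
        rw [show qbG q (k+1) (k+1) = qbG q k k + q ^ (k+1) * qbG q k (k+1) from rfl,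
          qbG_self, qbG_zero_of_lt q k (k+1) (by omega), ih k le_rfl, qbG_self]
        rw [show qbDen q (k+1) = qbDen q k * (q ^ (k+1) - 1) from rfl]
        ring

-- denominator non-zero under Pre_
theorem qb_pow_ne_one (q : Int) (hq1 : q ≠ 1) (hqm : q ≠ -1) (m : Nat) : q ^ (m+1) ≠ 1 := by
  intro h
  rcases show q ≤ -2 ∨ q = 0 ∨ 2 ≤ q by omega with h2 | h2 | h2
  · have habs : (2:Int) ≤ |q| := by rw [abs_of_nonpos (by omega)]; omega
    have : (2:Int) ≤ |q| ^ (m+1) := le_trans habs (le_self_pow₀ (by omega) (by omega))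
    rw [← abs_pow, h] at this; simp at this
  · subst h2; simp at h
  · have habs : (2:Int) ≤ |q| := by
      rw [abs_of_nonneg (by omega)]; exact h2
    have : (2:Int) ≤ |q| ^ (m+1) := le_trans habs (le_self_pow₀ (by omega) (by omega))
    rw [← abs_pow, h] at this; simp at this

theorem qbDen_ne_zero (q : Int) (hq1 : q ≠ 1) : ∀ k : Nat, (q = -1 → k ≤ 1) → qbDen q k ≠ 0 := by
  intro k
  induction k with
  | zero => intro _; simp [qbDen]
  | succ k ih =>
    intro hqm
    rw [qbDen]
    by_cases hq : q = -1
    · have hk0 : k = 0 := by have := hqm hq; omega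
      subst hk0; subst hq; norm_num [qbDen]
    · exact mul_ne_zero (ih (fun h => absurd h hq)) (fun h => qb_pow_ne_one q hq1 hq k (by omega))

-- fold-to-product bridge for port A
theorem qbA_fold (q n : Int) (K : Nat) (hn : (K : Int) ≤ n) :
    (List.range K).foldl
      (fun (s : Int × Int) (t : Nat) =>
        (s.1 * (q ^ (n - ((0:Int) + t)).toNat - 1), s.2 * (q ^ (((0:Int) + t) + 1).toNat - 1))) (1, 1)
      = (qbNum q n.toNat K, qbDen q K) := by
  induction K with
  | zero => simp [qbNum, qbDen]
  | succ K ih =>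
    have hK : (K : Int) ≤ n := by omega
    rw [List.range_succ, List.foldl_append, ih hK]
    simp only [List.foldl_cons, List.foldl_nil]
    have e1 : (n - ((0:Int) + K)).toNat = n.toNat - K := by omega
    have e2 : (((0:Int) + K) + 1).toNat = K + 1 := by omega
    rw [e1, e2]; rfl

-- floor division is exact on an exact multiple
theorem qb_floordiv_exact (g d : Int) (hd : d ≠ 0) : PySem.Int.floordiv (g * d) d = g := by
  have h1 := PySem.Int.floordiv_mul_add_mod (g * d) d
  have h2 : PySem.Int.mod (g * d) d = 0 := by
    rw [PySem.Int.mod_eq_zero_iff_dvd]; exact dvd_mul_left d g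
  rw [h2, add_zero] at h1
  exact mul_right_cancel₀ hd h1

-- getD on a mapped range
theorem qb_getD_map_range (f : Nat → Int) {K j : Nat} (h : j < K) :
    (List.map f (List.range K)).getD j 0 = f j := by
  simp [List.getD_eq_getElem?_getD, h]

-- one q-Pascal step on the row of qbG values
theorem qb_step_map (q : Int) (K : Nat) (hK : 1 ≤ K) (m : Nat) :
    qbAltStep q (K : Int) ((List.range (K+1)).map (qbG q m))
      = (List.range (K+1)).map (qbG q (m+1)) := by
  have hcast : ((K : Int) + 1 - 1).toNat = K := by omega
  rw [qbAltStep, PySem.List.pyRange_one, hcast, List.map_map]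
  rw [show (List.range (K+1)).map (qbG q (m+1))
        = qbG q (m+1) 0 :: (List.range K).map (qbG q (m+1) ∘ Nat.succ) by
      rw [List.range_succ_eq_map, List.map_cons, List.map_map]]
  have hhead : qbG q (m+1) 0 = 1 := rfl
  rw [hhead]
  congr 1
  apply List.map_congr_left
  intro t ht
  have htK : t < K := List.mem_range.mp ht
  simp only [Function.comp_apply]
  have h1 : (1:Int) + (t:Int) - 1 = ((t:Nat):Int) := by ring
  have h2 : ((1:Int) + (t:Int)).toNat = t + 1 := by omega
  have e1 : PySem.List.pyGetD ((List.range (K+1)).map (qbG q m)) ((t:Nat):Int) 0 = qbG q m t := by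
    rw [PySem.List.pyGetD_of_nonneg _ 0 (by positivity), show (((t:Nat):Int)).toNat = t by omega]
    exact qb_getD_map_range _ (by omega)
  have e2 : PySem.List.pyGetD ((List.range (K+1)).map (qbG q m)) (1 + (t:Int)) 0 = qbG q m (t+1) := by
    rw [PySem.List.pyGetD_of_nonneg _ 0 (by positivity), h2]
    exact qb_getD_map_range _ (by omega)
  rw [h1, h2, e1, e2]
  show qbG q m t + q ^ (t+1) * qbG q m (t+1) = qbG q (m+1) (t+1)
  rfl

-- iterate the fold
theorem qb_foldl_const {α β : Type} (l : List β) (g : α → α) (init : α) :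
    l.foldl (fun r _ => g r) init = g^[l.length] init := by
  induction l generalizing init with
  | nil => rfl
  | cons a l ih => simp [List.foldl_cons, ih, Function.iterate_succ_apply]

theorem qb_row0 (q : Int) (K : Nat) :
    (1 :: List.replicate K (0:Int)) = (List.range (K+1)).map (qbG q 0) := by
  rw [List.range_succ_eq_map, List.map_cons, List.map_map]
  have h2 : List.map (qbG q 0 ∘ Nat.succ) (List.range K) = List.map (fun _ => (0:Int)) (List.range K) :=
    List.map_congr_left (fun t _ => by simp [Function.comp, qbG])
  rw [h2, List.map_const', List.length_range]
  rfl

theorem qb_rows (q : Int) (K : Nat) (hK : 1 ≤ K) : ∀ m : Nat,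
    (qbAltStep q (K : Int))^[m] (1 :: List.replicate K (0:Int))
      = (List.range (K+1)).map (qbG q m) := by
  intro m
  induction m with
  | zero => simpa using qb_row0 q K
  | succ m ih => rw [Function.iterate_succ_apply', ih, qb_step_map q K hK m]

-- ===== VERDICT (by name: the statement is the Claim_ definition above) =====
theorem q_binomial_spec : Claim_equal_q_binomial := by
  intro n k q _ hpre
  unfold Spec_q_binomial q_binomial q_binomial_alt
  by_cases hg1 : k < 0 ∨ n < k
  · simp [hg1]
  by_cases hg2 : k = 0 ∨ k = n
  · simp [hg1, hg2]
  simp only [if_neg hg1, if_neg hg2]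
  push Not at hg1 hg2
  have hk0 : 0 < k := lt_of_le_of_ne hg1.1 (Ne.symm hg2.1)
  have hkn : k < n := lt_of_le_of_ne hg1.2 hg2.2
  obtain ⟨hq1, hqm⟩ := hpre ⟨hk0, hkn⟩
  have hKpos : 1 ≤ k.toNat := by omega
  have hKN : k.toNat ≤ n.toNat := by omega
  -- A side: the interleaved fold is the pair of products
  have hA : (PySem.List.pyRange 0 k 1).foldl
      (fun (s : Int × Int) i =>
        (s.1 * (q ^ (n - i).toNat - 1), s.2 * (q ^ (i + 1).toNat - 1))) (1, 1)
      = (qbNum q n.toNat k.toNat, qbDen q k.toNat) := by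
    rw [PySem.List.pyRange_one, List.foldl_map]
    rw [show (k - 0 : Int).toNat = k.toNat by omega]
    exact qbA_fold q n k.toNat (by omega)
  -- B side: the fold of steps is the row of qbG values
  have hB : (PySem.List.pyRange 0 n 1).foldl (fun row _ => qbAltStep q k row)
        (1 :: List.replicate k.toNat 0)
      = (List.range (k.toNat + 1)).map (qbG q n.toNat) := by
    rw [qb_foldl_const, PySem.List.length_pyRange_one,
        show (n - 0 : Int).toNat = n.toNat by omega,
        show (k : Int) = ((k.toNat : Nat) : Int) by omega]
    exact qb_rows q k.toNat hKpos n.toNat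
  rw [hA, hB]
  rw [PySem.List.pyGetD_of_nonneg _ 0 (by omega),
      qb_getD_map_range (qbG q n.toNat) (show k.toNat < k.toNat + 1 by omega)]
  rw [qb_main q n.toNat k.toNat hKN]
  exact qb_floordiv_exact _ _ (qbDen_ne_zero q hq1 k.toNat (fun h => by have := hqm h; omega))

theorem q_binomial_raises : Claim_raises_q_binomial := by
  unfold Claim_raises_q_binomial
  constructor
  · intro n k q _ hr hpre
    obtain ⟨hq1, hqm⟩ := hpre hr.1
    rcases hr.2 with h | h
    · exact hq1 h
    · have := hqm h.1; omega
  · exact ⟨by decide, by decide, by decide⟩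

-- checkable corollary of q_binomial_raises at the raise witness
theorem q_binomial_raises_ok :
    Raises_q_binomial 4 2 1 ∧ q_binomial_alt 4 2 1 = pvRaiseWitnessOut_q_binomial := by
  have h := q_binomial_raises
  unfold Claim_raises_q_binomial at h
  exact ⟨h.2.2.1, h.2.2.2⟩
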